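-- pv_equiv track=rewrite | github.com/hojoungjang/programming-exercises | 1759-암호-만들기/solution.py | solution
-- ===== SOURCE A (Python) =====
-- def solution(letters, length):
--
--     def validate(code):
--         vowels = 0
--         consonants = 0
--         for letter in code:
--             if letter in "aeiou":
--                 vowels += 1
--             else:
--                 consonants += 1
--
--         if vowels < 1 or consonants < 2:
--             return False
--         return True
--
--     def combine(idx, code):
--         if len(code) == length and validate(code):
--             codes.append("".join(code))
--             return
--
--         if idx >= len(letters):
--             return
--
--         code.append(letters[idx])
--         combine(idx+1, code)
--         code.pop()
--         combine(idx+1, code)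
--
--     ################################
--     letters.sort()
--     codes = []
--     combine(0, [])
--     return codes
-- ===== SOURCE B (Python) =====
-- def solution(letters, length):
--     letters.sort()
--
--     def combos(items, k):
--         # all k-element combinations of items, in order (choose-head first)
--         if k == 0:
--             return [[]]
--         if k < 0 or k > len(items):
--             return []
--         rest = items[1:]
--         return [[items[0]] + c for c in combos(rest, k - 1)] + combos(rest, k)
--
--     out = []
--     for combo in combos(letters, length):
--         vowels = sum(1 for letter in combo if letter in "aeiou")
--         if vowels >= 1 and len(combo) - vowels >= 2:
--             out.append("".join(combo))
--     return out
-- ===== Notes on version B (the rewrite author's own statement) =====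
-- stated objective: alternative
-- what changed: A explores the full include/exclude binary recursion over all subsets of the letter list, collecting codes that reach the target size and validate; B generates the length-element combinations directly by a choose-head/drop-head structural recursion (with k==0 and k>len cutoffs) and then filters them with an arithmetic vowel count in one loop.
import Mathlib
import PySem

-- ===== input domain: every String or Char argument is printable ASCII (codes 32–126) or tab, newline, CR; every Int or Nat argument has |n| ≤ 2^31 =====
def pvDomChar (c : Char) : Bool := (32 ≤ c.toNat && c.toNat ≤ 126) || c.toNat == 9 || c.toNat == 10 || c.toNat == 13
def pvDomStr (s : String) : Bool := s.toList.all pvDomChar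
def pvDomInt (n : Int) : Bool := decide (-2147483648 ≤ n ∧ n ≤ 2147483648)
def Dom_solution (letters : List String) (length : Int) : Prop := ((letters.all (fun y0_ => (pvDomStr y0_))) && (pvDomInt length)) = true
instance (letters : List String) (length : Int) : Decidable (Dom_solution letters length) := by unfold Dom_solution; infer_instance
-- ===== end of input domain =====

-- B replaces A's include/exclude subset recursion by a direct k-combinations recursion
-- plus a filter loop; equivalence is about the RETURN value (both Pythons sort
-- `letters` in place the same way).

-- ===== PORT A =====
-- validate(code): count vowels/consonants in a loop, reject if vowels < 1 or consonants < 2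
def pyValidate (code : List String) : Bool :=
  let p : Int × Int := code.foldl
    (fun (p : Int × Int) letter =>
      if PySem.Str.isIn letter "aeiou" then (p.1 + 1, p.2) else (p.1, p.2 + 1))
    (0, 0)
  if p.1 < 1 ∨ p.2 < 2 then false else true

-- combine(idx, code): include letters[idx] first, then exclude; `codes` threaded as the accumulator
def pyCombine (letters : List String) (length : Int) (idx : Nat)
    (code : List String) (codes : List String) : List String :=
  if (code.length : Int) = length ∧ pyValidate code then
    codes ++ [PySem.Str.join "" code]
  else if h : idx ≥ letters.length then
    codes
  else
    let codes1 := pyCombine letters length (idx + 1) (code ++ [letters[idx]'(by omega)]) codes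
    pyCombine letters length (idx + 1) code codes1
termination_by letters.length - idx
decreasing_by all_goals omega

def solution (letters : List String) (length : Int) : List String :=
  let lettersS := PySem.List.sorted letters (fun x => x) false
  pyCombine lettersS length 0 [] []

-- ===== PORT B =====
-- combos(items, k): all k-element combinations, choose-head first ([] branch is unreachable:
-- 0 < k ≤ len(items) there)
def altCombos (items : List String) (k : Int) : List (List String) :=
  if k = 0 then [[]]
  else if k < 0 ∨ k > (items.length : Int) then []
  else
    match items with
    | [] => []
    | x :: rest => (altCombos rest (k - 1)).map (fun c => x :: c) ++ altCombos rest k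

-- vowels = sum(1 for letter in combo if letter in "aeiou"); keep iff vowels>=1 and len-vowels>=2
def altVowels (combo : List String) : Int :=
  combo.foldl (fun s letter => if PySem.Str.isIn letter "aeiou" then s + 1 else s) 0

def solution_alt (letters : List String) (length : Int) : List String :=
  let lettersS := PySem.List.sorted letters (fun x => x) false
  (altCombos lettersS length).foldl
    (fun out combo =>
      if 1 ≤ altVowels combo ∧ 2 ≤ (combo.length : Int) - altVowels combo then
        out ++ [PySem.Str.join "" combo]
      else out)
    []

-- ===== PRECONDITION & SPEC =====
def Spec_solution (letters : List String) (length : Int) (out : List String) : Prop := out = solution_alt letters length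
instance (letters : List String) (length : Int) (out : List String) : Decidable (Spec_solution letters length out) := by unfold Spec_solution; infer_instance

-- ===== CLAIM (what is proved, stated in full; the proofs are below) =====
def Claim_equal_solution : Prop := ∀ (letters : List String) (length : Int), Dom_solution letters length → Spec_solution letters length (solution letters length)

-- ===== LEMMAS AND PROOFS =====

lemma altVowels_eq (l : List String) :
    altVowels l = (l.countP (fun s => PySem.Str.isIn s "aeiou") : Int) := by
  simpa using PySem.List.foldl_if_add_one (p := fun s => PySem.Str.isIn s "aeiou") (l := l) (a := 0)

lemma pyValidate_eq (code : List String) :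
    pyValidate code
      = decide (1 ≤ altVowels code ∧ 2 ≤ (code.length : Int) - altVowels code) := by
  have hdef : pyValidate code
      = (if (code.foldl
            (fun (p : Int × Int) letter =>
              if PySem.Str.isIn letter "aeiou" then (p.1 + 1, p.2) else (p.1, p.2 + 1))
            (0, 0)).1 < 1 ∨ (code.foldl
            (fun (p : Int × Int) letter =>
              if PySem.Str.isIn letter "aeiou" then (p.1 + 1, p.2) else (p.1, p.2 + 1))
            (0, 0)).2 < 2 then false else true) := rfl
  rw [hdef]
  have hfun : (fun (p : Int × Int) letter =>
        if PySem.Str.isIn letter "aeiou" then (p.1 + 1, p.2) else (p.1, p.2 + 1))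
      = (fun (p : Int × Int) letter =>
        ((fun (a : Int) l => if PySem.Str.isIn l "aeiou" then a + 1 else a) p.1 letter,
         (fun (a : Int) l => if !PySem.Str.isIn l "aeiou" then a + 1 else a) p.2 letter)) := by
    funext p letter
    by_cases h : PySem.Chars.isIn letter.toList ['a', 'e', 'i', 'o', 'u'] = true <;> simp [h]
  rw [hfun, PySem.List.foldl_prod_mk
        (f := fun (a : Int) l => if PySem.Str.isIn l "aeiou" then a + 1 else a)
        (g := fun (a : Int) l => if !PySem.Str.isIn l "aeiou" then a + 1 else a),
      PySem.List.foldl_if_add_one, PySem.List.foldl_if_add_one]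
  have hc := code.length_eq_countP_add_countP (fun s => PySem.Str.isIn s "aeiou")
  have hnp : code.countP (fun l => !PySem.Str.isIn l "aeiou")
      = code.countP (fun a => decide ¬(PySem.Str.isIn a "aeiou" = true)) := by
    apply List.countP_congr
    intro x _
    simp
  rw [altVowels_eq]
  by_cases hd : 1 ≤ (code.countP (fun s => PySem.Str.isIn s "aeiou") : Int) ∧
      2 ≤ (code.length : Int) - (code.countP (fun s => PySem.Str.isIn s "aeiou") : Int)
  · rw [if_neg (by rw [← hnp] at hc; simp only []; omega)]
    exact (decide_eq_true hd).symm
  · rw [if_pos (by rw [← hnp] at hc; simp only []; omega)]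
    exact (decide_eq_false hd).symm

def pvF (code : List String) : List String → Option String := fun c =>
  if pyValidate (code ++ c) then some (PySem.Str.join "" (code ++ c)) else none

lemma altCombos_neg (items : List String) (k : Int) (hk : k < 0) : altCombos items k = [] := by
  rw [altCombos.eq_def]
  rw [if_neg (by omega), if_pos (Or.inl hk)]

lemma altCombos_big (items : List String) (k : Int) (hk : (items.length : Int) < k) :
    altCombos items k = [] := by
  rw [altCombos.eq_def]
  rw [if_neg (by omega), if_pos (Or.inr hk)]

lemma altCombos_zero (items : List String) : altCombos items 0 = [[]] := by
  rw [altCombos.eq_def]; simp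

lemma pyValidate_false_of_not (code : List String) (length : Int)
    (h1 : ¬((code.length : Int) = length ∧ pyValidate code = true))
    (h0 : length - (code.length : Int) = 0) : pyValidate code = false := by
  cases hv : pyValidate code
  · rfl
  · exact absurd ⟨by omega, hv⟩ h1

lemma combine_spec (letters : List String) (length : Int) :
    ∀ (fuel idx : Nat), letters.length - idx ≤ fuel → ∀ (code codes : List String),
    pyCombine letters length idx code codes
      = codes ++ (altCombos (letters.drop idx) (length - code.length)).filterMap (pvF code) := by
  intro fuel
  induction fuel with
  | zero =>
    intro idx hid code codes
    have hge : idx ≥ letters.length := by omega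
    rw [pyCombine]
    by_cases h1 : (code.length : Int) = length ∧ pyValidate code
    · rw [if_pos h1]
      rw [show length - (code.length : Int) = 0 by omega, altCombos_zero]
      simp [pvF, h1.2]
    · rw [if_neg h1, dif_pos hge, List.drop_eq_nil_of_le hge]
      by_cases h0 : length - (code.length : Int) = 0
      · rw [h0, altCombos_zero]
        simp [pvF, pyValidate_false_of_not code length h1 h0]
      · rcases lt_or_gt_of_ne h0 with hlt | hgt
        · rw [altCombos_neg _ _ (by omega)]; simp
        · rw [altCombos_big _ _ (by simp; omega)]; simp
  | succ n ih =>
    intro idx hid code codes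
    rw [pyCombine]
    by_cases h1 : (code.length : Int) = length ∧ pyValidate code
    · rw [if_pos h1]
      rw [show length - (code.length : Int) = 0 by omega, altCombos_zero]
      simp [pvF, h1.2]
    · rw [if_neg h1]
      by_cases hge : idx ≥ letters.length
      · -- out of letters: same as the fuel-zero case
        rw [dif_pos hge, List.drop_eq_nil_of_le hge]
        by_cases h0 : length - (code.length : Int) = 0
        · rw [h0, altCombos_zero]
          simp [pvF, pyValidate_false_of_not code length h1 h0]
        · rcases lt_or_gt_of_ne h0 with hlt | hgt
          · rw [altCombos_neg _ _ (by omega)]; simp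
          · rw [altCombos_big _ _ (by simp; omega)]; simp
      · rw [dif_neg hge]
        push_neg at hge
        have hdrop : letters.drop idx = letters[idx] :: letters.drop (idx + 1) :=
          List.drop_eq_getElem_cons hge
        have hrec1 := ih (idx + 1) (by omega) (code ++ [letters[idx]]) codes
        have hrec2 := ih (idx + 1) (by omega) code
            (pyCombine letters length (idx + 1) (code ++ [letters[idx]]) codes)
        rw [hrec2, hrec1, hdrop]
        set k := length - (code.length : Int) with hk
        set rest := letters.drop (idx + 1) with hrest
        have hlen : length - (((code ++ [letters[idx]]).length : Nat) : Int) = k - 1 := by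
          simp [hk]; ring
        rw [hlen]
        by_cases h0 : k = 0
        · -- code already has the target size but failed validate
          have hv := pyValidate_false_of_not code length h1 (by omega)
          rw [h0, altCombos_neg rest (0 - 1) (by omega),
              altCombos_zero (letters[idx] :: rest), altCombos_zero rest]
          simp [pvF, hv]
        · by_cases hbig : k < 0 ∨ (1 + (rest.length : Int)) < k
          · -- too few letters remain (or negative target): every piece is empty
            have e1 : altCombos (letters[idx] :: rest) k = [] := by
              rcases hbig with hb | hb
              · exact altCombos_neg _ _ hb
              · exact altCombos_big _ _ (by simp; omega)
            have e2 : altCombos rest (k - 1) = [] := by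
              rcases hbig with hb | hb
              · exact altCombos_neg _ _ (by omega)
              · exact altCombos_big _ _ (by omega)
            have e3 : altCombos rest k = [] := by
              rcases hbig with hb | hb
              · exact altCombos_neg _ _ hb
              · exact altCombos_big _ _ (by omega)
            rw [e1, e2, e3]
            simp
          · -- main case: combos(x :: rest, k) = map (x ::) combos(rest, k-1) ++ combos(rest, k)
            push_neg at hbig
            have e1 : altCombos (letters[idx] :: rest) k
                = (altCombos rest (k - 1)).map (fun c => letters[idx] :: c) ++ altCombos rest k := by
              rw [altCombos.eq_def]
              rw [if_neg h0, if_neg (by simp; omega)]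
            rw [e1, List.filterMap_append, List.filterMap_map]
            have e2 : (pvF code) ∘ (fun c => letters[idx] :: c) = pvF (code ++ [letters[idx]]) := by
              funext c
              simp [pvF, Function.comp]
            rw [e2, List.append_assoc]

-- B's append-if loop is filterMap of pvF []
lemma alt_loop_eq (l : List (List String)) : ∀ (acc : List String),
    l.foldl
      (fun out combo =>
        if 1 ≤ altVowels combo ∧ 2 ≤ (combo.length : Int) - altVowels combo then
          out ++ [PySem.Str.join "" combo]
        else out)
      acc
    = acc ++ l.filterMap (pvF []) := by
  induction l with
  | nil => intro acc; simp
  | cons c t ih =>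
    intro acc
    by_cases hc : 1 ≤ altVowels c ∧ 2 ≤ (c.length : Int) - altVowels c
    · simp only [List.foldl_cons, if_pos hc, ih, List.filterMap_cons]
      have hf : pvF [] c = some (PySem.Str.join "" c) := by
        simp [pvF, pyValidate_eq, hc]
      rw [hf]
      simp
    · simp only [List.foldl_cons, if_neg hc, ih, List.filterMap_cons]
      have hf : pvF [] c = none := by
        simp [pvF, pyValidate_eq, hc]
      rw [hf]

-- ===== VERDICT (by name: the statement is the Claim_ definition above) =====
theorem solution_spec : Claim_equal_solution := by
  intro letters length _
  show solution letters length = solution_alt letters length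
  unfold solution solution_alt
  rw [alt_loop_eq]
  rw [combine_spec _ length (PySem.List.sorted letters (fun x => x) false).length 0 (by omega)]
  simp
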